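-- pv_equiv track=rewrite | github.com/miunasu/Spore | base/text_protocol/action_parser.py | _parse_simple_value
-- ===== SOURCE A (Python) =====
-- def _parse_simple_value(text: str, start: int) -> tuple:
--     """解析简单值（到下一个空白或参数）"""
--     i = start
--
--     while i < len(text):
--         char = text[i]
--
--         # 遇到换行符，结束当前值
--         if char == '\n':
--             break
--
--         # 遇到空格或制表符，检查是否是新参数
--         if char in ' \t':
--             # 检查后面是否是新参数
--             j = i + 1
--             while j < len(text) and text[j] in ' \t':
--                 j += 1
--
--             if j < len(text) and text[j] != '\n':
--                 # 查找 = 号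
--                 k = j
--                 while k < len(text) and text[k] not in '= \t\n':
--                     k += 1
--                 if k < len(text) and text[k] == '=':
--                     # 是新参数，结束当前值
--                     break
--
--         i += 1
--
--     value = text[start:i].strip()
--
--     # 简单值保持为字符串，不自动转换类型
--     # 这样可以保持 round-trip 一致性
--     # 类型转换只在 JSON 上下文中进行
--     return value, i
-- ===== SOURCE B (Python) =====
-- def _parse_simple_value(text: str, start: int) -> tuple:
--     # One backward pass over the tail: a 3-field DP computed per suffix replaces
--     # A's forward scan with nested per-whitespace-char lookahead rescans.
--     #   tok: the run of non-'= \t\n' chars starting here ends at '='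
--     #   par: after skipping spaces/tabs here, a non-newline '='-terminated token follows
--     #   brk: how many chars the value scan consumes from here
--     tail = text[start:]
--     tok = par = False
--     brk = 0
--     for c in reversed(tail):
--         if c == '\n':
--             tok, par, brk = False, False, 0
--         elif c in ' \t':
--             tok, par, brk = False, par, (0 if par else brk + 1)
--         elif c == '=':
--             tok, par, brk = True, True, brk + 1
--         else:
--             tok, par, brk = tok, tok, brk + 1
--     return tail[:brk].strip(), start + brk
-- ===== Notes on version B (the rewrite author's own statement) =====
-- stated objective: faster
-- what changed: B replaces A's forward scan with nested whitespace/token lookahead rescans by a single backward fold over the tail maintaining a 3-field suffix DP (token-ends-at-'=', param-ahead-after-whitespace, break offset), so no inner loops remain: O(n) instead of O(n^2) on long whitespace runs.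
-- outside the precondition, e.g. on _parse_simple_value('a=1', -3): A returns ('a=1', 3), B returns ('a=1', 0)
import Mathlib
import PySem

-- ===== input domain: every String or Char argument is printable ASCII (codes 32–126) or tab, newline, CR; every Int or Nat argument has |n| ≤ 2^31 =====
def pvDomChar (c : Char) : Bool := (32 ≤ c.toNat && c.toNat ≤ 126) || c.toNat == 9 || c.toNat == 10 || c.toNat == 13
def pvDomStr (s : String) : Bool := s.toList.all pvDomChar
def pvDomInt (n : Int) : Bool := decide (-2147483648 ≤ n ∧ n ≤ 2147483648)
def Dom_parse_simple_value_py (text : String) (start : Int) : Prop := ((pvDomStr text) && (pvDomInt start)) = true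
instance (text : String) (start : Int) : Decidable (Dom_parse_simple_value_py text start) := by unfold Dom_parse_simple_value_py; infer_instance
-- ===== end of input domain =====

-- B replaces A's forward scan with nested lookahead rescans by ONE backward fold over the tail
-- maintaining a 3-field suffix DP (token-ends-at-'=', param-ahead, break offset); no inner loops
-- remain, and a timing run measured B faster on its generated inputs.
-- A's loops are ported as structural recursions on an exact fuel ((len - index).toNat), a pure
-- totality guard: with that fuel the recursion stops exactly where the Python while-condition does.

-- ===== PORT A =====
-- A's inner `while j < len(text) and text[j] in ' \t'` loop
def pvA_skipGo (cs : List Char) : Nat → Int → Int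
  | 0, j => j
  | fuel + 1, j =>
    if j < (cs.length : Int) ∧
        ((PySem.List.pyGet? cs j).getD '\n' = ' ' ∨ (PySem.List.pyGet? cs j).getD '\n' = '\t') then
      pvA_skipGo cs fuel (j + 1)
    else j

def pvA_skip (cs : List Char) (j : Int) : Int := pvA_skipGo cs ((cs.length : Int) - j).toNat j

-- A's inner `while k < len(text) and text[k] not in '= \t\n'` loop
def pvA_tokGo (cs : List Char) : Nat → Int → Int
  | 0, k => k
  | fuel + 1, k =>
    if k < (cs.length : Int) ∧
        ¬((PySem.List.pyGet? cs k).getD '=' = '=' ∨ (PySem.List.pyGet? cs k).getD '=' = ' ' ∨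
          (PySem.List.pyGet? cs k).getD '=' = '\t' ∨ (PySem.List.pyGet? cs k).getD '=' = '\n') then
      pvA_tokGo cs fuel (k + 1)
    else k

def pvA_tok (cs : List Char) (k : Int) : Int := pvA_tokGo cs ((cs.length : Int) - k).toNat k

-- A's main `while i < len(text)` loop; index accesses use pyGet? (the .getD default is only
-- reached outside Pre_)
def pvA_loopGo (cs : List Char) : Nat → Int → Int
  | 0, i => i
  | fuel + 1, i =>
    if i < (cs.length : Int) then
      let char := (PySem.List.pyGet? cs i).getD '\n'
      if char = '\n' then i
      else if char = ' ' ∨ char = '\t' then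
        let j := pvA_skip cs (i + 1)
        if j < (cs.length : Int) ∧ (PySem.List.pyGet? cs j).getD '\n' ≠ '\n' then
          let k := pvA_tok cs j
          if k < (cs.length : Int) ∧ (PySem.List.pyGet? cs k).getD ' ' = '=' then i
          else pvA_loopGo cs fuel (i + 1)
        else pvA_loopGo cs fuel (i + 1)
      else pvA_loopGo cs fuel (i + 1)
    else i

def parse_simple_value_py (text : String) (start : Int) : String × Int :=
  let i := pvA_loopGo text.toList ((text.toList.length : Int) - start).toNat start
  (PySem.Str.strip (PySem.Str.slice text (some start) (some i)), i)

-- ===== PORT B =====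
-- Source B's loop body: one DP step, consuming one char of the tail from the right;
-- state (tok, par, brk) as in Source B's comment
def pvB_step (s : Bool × Bool × Nat) (c : Char) : Bool × Bool × Nat :=
  if c = '\n' then (false, false, 0)
  else if c = ' ' ∨ c = '\t' then (false, s.2.1, if s.2.1 then 0 else s.2.2 + 1)
  else if c = '=' then (true, true, s.2.2 + 1)
  else (s.1, s.1, s.2.2 + 1)

def parse_simple_value_py_alt (text : String) (start : Int) : String × Int :=
  let tail := PySem.Str.slice text (some start) none
  let s := tail.toList.reverse.foldl pvB_step (false, false, 0)
  (PySem.Str.strip (PySem.Str.slice tail none (some ((s.2.2 : Nat) : Int))), start + (s.2.2 : Int))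

-- ===== PRECONDITION & SPEC =====
-- Pre_ excludes negative start, a cursor position no caller passes: there A's value comes from
-- Python's negative-index wraparound (and A raises IndexError for start < -len), while B reads
-- the tail slice; both values are accidental and neither is specified — see claim.json cites.
def Pre_parse_simple_value_py (text : String) (start : Int) : Prop := 0 ≤ start
instance (text : String) (start : Int) : Decidable (Pre_parse_simple_value_py text start) := by
  unfold Pre_parse_simple_value_py; infer_instance

def pvWitness_parse_simple_value_py : String × Int := ("abc x=1", 0)

def Spec_parse_simple_value_py (text : String) (start : Int) (out : String × Int) : Prop := out = parse_simple_value_py_alt text start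
instance (text : String) (start : Int) (out : String × Int) : Decidable (Spec_parse_simple_value_py text start out) := by unfold Spec_parse_simple_value_py; infer_instance

-- ===== CLAIM (what is proved, stated in full; the proofs are below) =====
def Claim_equal_parse_simple_value_py : Prop := ∀ (text : String) (start : Int), Dom_parse_simple_value_py text start → Pre_parse_simple_value_py text start → Spec_parse_simple_value_py text start (parse_simple_value_py text start)

-- ===== LEMMAS AND PROOFS =====

-- the three DP fields of B as plain structural functions of the suffix
def pvTokF : List Char → Bool
  | [] => false
  | c :: cs => if c = '=' then true else if c = ' ' ∨ c = '\t' ∨ c = '\n' then false else pvTokF cs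

def pvParF : List Char → Bool
  | [] => false
  | c :: cs =>
    if c = '\n' then false
    else if c = ' ' ∨ c = '\t' then pvParF cs
    else if c = '=' then true
    else pvTokF cs

def pvBrkF : List Char → Nat
  | [] => 0
  | c :: cs =>
    if c = '\n' then 0
    else if c = ' ' ∨ c = '\t' then (if pvParF cs then 0 else pvBrkF cs + 1)
    else pvBrkF cs + 1

-- B's backward fold computes exactly the three suffix functions
theorem pvB_fold_eq (l : List Char) :
    l.reverse.foldl pvB_step (false, false, 0) = (pvTokF l, pvParF l, pvBrkF l) := by
  induction l with
  | nil => rfl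
  | cons c cs ih =>
    simp only [List.reverse_cons, List.foldl_append, List.foldl_cons, List.foldl_nil, ih]
    by_cases h1 : c = '\n'
    · simp [pvB_step, pvTokF, pvParF, pvBrkF, h1]
    · by_cases h2 : c = ' ' ∨ c = '\t'
      · simp [pvB_step, pvTokF, pvParF, pvBrkF, h1, h2]
        rcases h2 with h2 | h2 <;> simp [h2]
      · by_cases h3 : c = '='
        · simp [pvB_step, pvTokF, pvParF, pvBrkF, h3]
        · simp [pvB_step, pvTokF, pvParF, pvBrkF, h1, h2, h3]

-- exact-fuel step/stop lemmas for A's two inner loops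
theorem pvA_tok_stop (cs : List Char) (k : Int)
    (h : ¬(k < (cs.length : Int) ∧
      ¬((PySem.List.pyGet? cs k).getD '=' = '=' ∨ (PySem.List.pyGet? cs k).getD '=' = ' ' ∨
        (PySem.List.pyGet? cs k).getD '=' = '\t' ∨ (PySem.List.pyGet? cs k).getD '=' = '\n'))) :
    pvA_tok cs k = k := by
  unfold pvA_tok
  cases hc : ((cs.length : Int) - k).toNat with
  | zero => rfl
  | succ f => simp only [pvA_tokGo]; rw [if_neg h]

theorem pvA_tok_step (cs : List Char) (k : Int)
    (h : k < (cs.length : Int) ∧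
      ¬((PySem.List.pyGet? cs k).getD '=' = '=' ∨ (PySem.List.pyGet? cs k).getD '=' = ' ' ∨
        (PySem.List.pyGet? cs k).getD '=' = '\t' ∨ (PySem.List.pyGet? cs k).getD '=' = '\n')) :
    pvA_tok cs k = pvA_tok cs (k + 1) := by
  unfold pvA_tok
  have hc : ((cs.length : Int) - k).toNat = ((cs.length : Int) - (k + 1)).toNat + 1 := by
    have := h.1; omega
  rw [hc]
  simp only [pvA_tokGo]
  rw [if_pos h]

theorem pvA_skip_stop (cs : List Char) (j : Int)
    (h : ¬(j < (cs.length : Int) ∧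
      ((PySem.List.pyGet? cs j).getD '\n' = ' ' ∨ (PySem.List.pyGet? cs j).getD '\n' = '\t'))) :
    pvA_skip cs j = j := by
  unfold pvA_skip
  cases hc : ((cs.length : Int) - j).toNat with
  | zero => rfl
  | succ f => simp only [pvA_skipGo]; rw [if_neg h]

theorem pvA_skip_step (cs : List Char) (j : Int)
    (h : j < (cs.length : Int) ∧
      ((PySem.List.pyGet? cs j).getD '\n' = ' ' ∨ (PySem.List.pyGet? cs j).getD '\n' = '\t')) :
    pvA_skip cs j = pvA_skip cs (j + 1) := by
  unfold pvA_skip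
  have hc : ((cs.length : Int) - j).toNat = ((cs.length : Int) - (j + 1)).toNat + 1 := by
    have := h.1; omega
  rw [hc]
  simp only [pvA_skipGo]
  rw [if_pos h]

-- the main loop entered with its exact fuel, and its one-step unfolding
def pvAL (cs : List Char) (i : Int) : Int := pvA_loopGo cs ((cs.length : Int) - i).toNat i

theorem pvAL_unfold (cs : List Char) (i : Int) :
    pvAL cs i =
      if i < (cs.length : Int) then
        if (PySem.List.pyGet? cs i).getD '\n' = '\n' then i
        else if (PySem.List.pyGet? cs i).getD '\n' = ' ' ∨ (PySem.List.pyGet? cs i).getD '\n' = '\t' then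
          if pvA_skip cs (i + 1) < (cs.length : Int) ∧
              (PySem.List.pyGet? cs (pvA_skip cs (i + 1))).getD '\n' ≠ '\n' then
            if pvA_tok cs (pvA_skip cs (i + 1)) < (cs.length : Int) ∧
                (PySem.List.pyGet? cs (pvA_tok cs (pvA_skip cs (i + 1)))).getD ' ' = '=' then i
            else pvAL cs (i + 1)
          else pvAL cs (i + 1)
        else pvAL cs (i + 1)
      else i := by
  unfold pvAL
  by_cases hi : i < (cs.length : Int)
  · have hc : ((cs.length : Int) - i).toNat = (((cs.length : Int) - (i + 1)).toNat) + 1 := by omega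
    rw [hc]
    simp only [pvA_loopGo]
  · have hc : ((cs.length : Int) - i).toNat = 0 := by omega
    rw [hc]
    simp only [pvA_loopGo]
    rw [if_neg hi]

-- in-range pyGet? at a Nat index is the list element
theorem pv_get_nat (cs : List Char) (k : Nat) (hk : k < cs.length) (d : Char) :
    (PySem.List.pyGet? cs (k : Int)).getD d = cs[k] := by
  rw [PySem.List.pyGet?_natCast]
  simp [List.getElem?_eq_getElem hk]

-- characterisation of A's token scan by pvTokF on the dropped suffix
theorem pv_tok_char (cs : List Char) (fuel : Nat) :
    ∀ k : Nat, cs.length - k ≤ fuel →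
      (pvTokF (cs.drop k) = true ↔
        pvA_tok cs (k : Int) < (cs.length : Int) ∧
          (PySem.List.pyGet? cs (pvA_tok cs (k : Int))).getD ' ' = '=') := by
  induction fuel with
  | zero =>
    intro k hk
    have hge : cs.length ≤ k := by omega
    rw [List.drop_eq_nil_of_le hge, pvA_tok_stop cs k (by
      intro h; have := h.1; omega)]
    simp only [pvTokF]
    constructor
    · intro h; exact absurd h (by simp)
    · intro h; exfalso; have := h.1; omega
  | succ fuel ih =>
    intro k hk
    by_cases hlt : k < cs.length
    · have hdrop : cs.drop k = cs[k] :: cs.drop (k + 1) := List.drop_eq_getElem_cons hlt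
      by_cases hcls : cs[k] = '=' ∨ cs[k] = ' ' ∨ cs[k] = '\t' ∨ cs[k] = '\n'
      · have hstop : pvA_tok cs (k : Int) = (k : Int) := pvA_tok_stop cs k (by
          rw [pv_get_nat cs k hlt]
          intro h; exact h.2 hcls)
        have hget := pv_get_nat cs k hlt ' '
        rw [hstop, hdrop, hget]
        simp only [pvTokF]
        rcases hcls with h | h | h | h
        · rw [if_pos h]
          simp [h, hlt]
        · have hne : cs[k] ≠ '=' := by rw [h]; decide
          rw [if_neg hne, if_pos (Or.inl h)]
          simp [hne]
        · have hne : cs[k] ≠ '=' := by rw [h]; decide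
          rw [if_neg hne, if_pos (Or.inr (Or.inl h))]
          simp [hne]
        · have hne : cs[k] ≠ '=' := by rw [h]; decide
          rw [if_neg hne, if_pos (Or.inr (Or.inr h))]
          simp [hne]
      · have hstep : pvA_tok cs (k : Int) = pvA_tok cs ((k : Int) + 1) := pvA_tok_step cs k (by
          rw [pv_get_nat cs k hlt]
          exact ⟨by exact_mod_cast hlt, hcls⟩)
        have hcast : ((k : Int) + 1) = ((k + 1 : Nat) : Int) := by push_cast; ring
        rw [hstep, hcast, hdrop]
        simp only [pvTokF]
        have h1 : ¬ cs[k] = '=' := fun h => hcls (Or.inl h)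
        have h2 : ¬ (cs[k] = ' ' ∨ cs[k] = '\t' ∨ cs[k] = '\n') := by
          intro h; rcases h with h | h | h
          · exact hcls (Or.inr (Or.inl h))
          · exact hcls (Or.inr (Or.inr (Or.inl h)))
          · exact hcls (Or.inr (Or.inr (Or.inr h)))
        rw [if_neg h1, if_neg h2]
        exact ih (k + 1) (by omega)
    · have hge : cs.length ≤ k := by omega
      rw [List.drop_eq_nil_of_le hge, pvA_tok_stop cs k (by
        intro h; have := h.1; omega)]
      simp only [pvTokF]
      constructor
      · intro h; exact absurd h (by simp)
      · intro h; exfalso; have := h.1; omega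

-- characterisation of A's whitespace-skip-then-token lookahead by pvParF
theorem pv_par_char (cs : List Char) (fuel : Nat) :
    ∀ k : Nat, cs.length - k ≤ fuel →
      (pvParF (cs.drop k) = true ↔
        pvA_skip cs (k : Int) < (cs.length : Int) ∧
          (PySem.List.pyGet? cs (pvA_skip cs (k : Int))).getD '\n' ≠ '\n' ∧
          pvA_tok cs (pvA_skip cs (k : Int)) < (cs.length : Int) ∧
          (PySem.List.pyGet? cs (pvA_tok cs (pvA_skip cs (k : Int)))).getD ' ' = '=') := by
  induction fuel with
  | zero =>
    intro k hk
    have hge : cs.length ≤ k := by omega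
    rw [List.drop_eq_nil_of_le hge, pvA_skip_stop cs k (by intro h; have := h.1; omega)]
    simp only [pvParF]
    constructor
    · intro h; exact absurd h (by simp)
    · intro h; exfalso; have := h.1; omega
  | succ fuel ih =>
    intro k hk
    by_cases hlt : k < cs.length
    · have hdrop : cs.drop k = cs[k] :: cs.drop (k + 1) := List.drop_eq_getElem_cons hlt
      by_cases hws : cs[k] = ' ' ∨ cs[k] = '\t'
      · have hstep : pvA_skip cs (k : Int) = pvA_skip cs ((k : Int) + 1) := pvA_skip_step cs k (by
          rw [pv_get_nat cs k hlt]
          exact ⟨by exact_mod_cast hlt, hws⟩)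
        have hcast : ((k : Int) + 1) = ((k + 1 : Nat) : Int) := by push_cast; ring
        rw [hstep, hcast, hdrop]
        simp only [pvParF]
        have hnl : ¬ cs[k] = '\n' := by rcases hws with h | h <;> simp [h]
        rw [if_neg hnl, if_pos hws]
        exact ih (k + 1) (by omega)
      · have hstop : pvA_skip cs (k : Int) = (k : Int) := pvA_skip_stop cs k (by
          rw [pv_get_nat cs k hlt]
          intro h; exact hws h.2)
        rw [hstop, hdrop]
        simp only [pvParF]
        by_cases hnl : cs[k] = '\n'
        · rw [if_pos hnl]
          constructor
          · intro h; exact absurd h (by simp)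
          · intro h; exact absurd (pv_get_nat cs k hlt '\n' ▸ hnl) h.2.1
        · rw [if_neg hnl, if_neg hws]
          have htk := pv_tok_char cs (cs.length - k) k (le_refl _)
          rw [hdrop] at htk
          simp only [pvTokF] at htk
          have hget : (PySem.List.pyGet? cs (k : Int)).getD '\n' ≠ '\n' := by
            rw [pv_get_nat cs k hlt]; exact hnl
          by_cases heq : cs[k] = '='
          · rw [if_pos heq]
            rw [if_pos heq] at htk
            constructor
            · intro _
              refine ⟨by exact_mod_cast hlt, hget, htk.mp rfl⟩
            · intro _; rfl
          · rw [if_neg heq]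
            have h2 : ¬ (cs[k] = ' ' ∨ cs[k] = '\t' ∨ cs[k] = '\n') := by
              intro h; rcases h with h | h | h
              · exact hws (Or.inl h)
              · exact hws (Or.inr h)
              · exact hnl h
            rw [if_neg heq, if_neg h2] at htk
            constructor
            · intro h
              exact ⟨by exact_mod_cast hlt, hget, htk.mp h⟩
            · intro h
              exact htk.mpr h.2.2
    · have hge : cs.length ≤ k := by omega
      rw [List.drop_eq_nil_of_le hge, pvA_skip_stop cs k (by intro h; have := h.1; omega)]
      simp only [pvParF]
      constructor
      · intro h; exact absurd h (by simp)
      · intro h; exfalso; have := h.1; omega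

-- A's main loop computes start + (B's break offset of the dropped suffix)
theorem pv_main_char (cs : List Char) (fuel : Nat) :
    ∀ i : Nat, cs.length - i ≤ fuel →
      pvAL cs (i : Int) = (i : Int) + (pvBrkF (cs.drop i) : Int) := by
  induction fuel with
  | zero =>
    intro i hi
    have hge : cs.length ≤ i := by omega
    rw [List.drop_eq_nil_of_le hge, pvAL_unfold, if_neg (by intro h; omega)]
    simp [pvBrkF]
  | succ fuel ih =>
    intro i hi
    by_cases hlt : i < cs.length
    · have hdrop : cs.drop i = cs[i] :: cs.drop (i + 1) := List.drop_eq_getElem_cons hlt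
      have hcast : ((i : Int) + 1) = ((i + 1 : Nat) : Int) := by push_cast; ring
      rw [pvAL_unfold, if_pos (by exact_mod_cast hlt), pv_get_nat cs i hlt, hdrop]
      simp only [pvBrkF]
      by_cases hnl : cs[i] = '\n'
      · rw [if_pos hnl, if_pos hnl]; simp
      · rw [if_neg hnl, if_neg hnl]
        by_cases hws : cs[i] = ' ' ∨ cs[i] = '\t'
        · rw [if_pos hws, if_pos hws]
          have hpar := pv_par_char cs (cs.length - (i + 1)) (i + 1) (le_refl _)
          rw [← hcast] at hpar
          by_cases hp : pvParF (cs.drop (i + 1)) = true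
          · obtain ⟨h1, h2, h3, h4⟩ := hpar.mp hp
            rw [if_pos hp, if_pos ⟨h1, h2⟩, if_pos ⟨h3, h4⟩]
            simp
          · rw [if_neg hp]
            have hrec : pvAL cs ((i : Int) + 1) = ((i + 1 : Nat) : Int) + (pvBrkF (cs.drop (i + 1)) : Int) := by
              rw [hcast]; exact ih (i + 1) (by omega)
            have hne : ∀ (hA : pvA_skip cs ((i : Int) + 1) < (cs.length : Int) ∧
                (PySem.List.pyGet? cs (pvA_skip cs ((i : Int) + 1))).getD '\n' ≠ '\n'),
                ¬ (pvA_tok cs (pvA_skip cs ((i : Int) + 1)) < (cs.length : Int) ∧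
                  (PySem.List.pyGet? cs (pvA_tok cs (pvA_skip cs ((i : Int) + 1)))).getD ' ' = '=') := by
              intro hA hT
              exact hp (hpar.mpr ⟨hA.1, hA.2, hT.1, hT.2⟩)
            by_cases h1 : pvA_skip cs ((i : Int) + 1) < (cs.length : Int) ∧
                (PySem.List.pyGet? cs (pvA_skip cs ((i : Int) + 1))).getD '\n' ≠ '\n'
            · rw [if_pos h1, if_neg (hne h1), hrec]; push_cast; ring
            · rw [if_neg h1, hrec]; push_cast; ring
        · rw [if_neg hws, if_neg hws]
          have hrec : pvAL cs ((i : Int) + 1) = ((i + 1 : Nat) : Int) + (pvBrkF (cs.drop (i + 1)) : Int) := by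
            rw [hcast]; exact ih (i + 1) (by omega)
          rw [hrec]; push_cast; ring
    · have hge : cs.length ≤ i := by omega
      rw [List.drop_eq_nil_of_le hge, pvAL_unfold, if_neg (by intro h; omega)]
      simp [pvBrkF]

-- ===== VERDICT (by name: the statement is the Claim_ definition above) =====
theorem parse_simple_value_py_spec : Claim_equal_parse_simple_value_py := by
  intro text start _ hpre
  obtain ⟨s0, hs0⟩ : ∃ s0 : Nat, start = (s0 : Int) := ⟨start.toNat, (Int.toNat_of_nonneg hpre).symm⟩
  subst hs0
  unfold Spec_parse_simple_value_py parse_simple_value_py parse_simple_value_py_alt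
  have htail : (PySem.Str.slice text (some (s0 : Int)) none).toList = text.toList.drop s0 := by
    simp only [PySem.Str.toList_slice, PySem.Chars.slice_eq_listSlice]
    exact PySem.List.slice_from_natCast text.toList s0
  have hmain := pv_main_char text.toList (text.toList.length - s0) s0 (le_refl _)
  unfold pvAL at hmain
  dsimp only
  rw [htail, pvB_fold_eq, hmain]
  dsimp only
  rw [Prod.mk.injEq]
  refine ⟨?_, rfl⟩
  rw [← String.toList_inj]
  simp only [PySem.Str.toList_strip, PySem.Str.toList_slice, PySem.Chars.slice_eq_listSlice]
  congr 1
  rw [PySem.List.slice_from_natCast, PySem.List.slice_to_natCast]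
  have hc : ((s0 : Int) + (pvBrkF (text.toList.drop s0) : Int))
      = ((s0 + pvBrkF (text.toList.drop s0) : Nat) : Int) := by push_cast; ring
  rw [hc, PySem.List.slice_natCast]
  congr 1
  omega
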